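-- pv_equiv track=rewrite | github.com/MrBrantCode/unitest_baseline | mut_generate/mist_train_taco/taco_6909/solution.py | max_satisfied_desires
-- ===== SOURCE A (Python) =====
-- def max_satisfied_desires(N, K, desires):
--     ws = [[0] * K for _ in range(K)]
--     bs = [[0] * K for _ in range(K)]
--
--     for (x, y, c) in desires:
--         t = x // K + y // K
--         if t % 2:
--             if c == 'W':
--                 c = 'B'
--             elif c == 'B':
--                 c = 'W'
--         ws[y % K][x % K] += int(c == 'W')
--         bs[y % K][x % K] += int(c == 'B')
--
--     csw = [[0] * (K + 1) for _ in range(K + 1)]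
--     csb = [[0] * (K + 1) for _ in range(K + 1)]
--
--     for i in range(K):
--         for j in range(K):
--             csw[i + 1][j + 1] = csw[i + 1][j] + csw[i][j + 1] - csw[i][j] + ws[i][j]
--             csb[i + 1][j + 1] = csb[i + 1][j] + csb[i][j + 1] - csb[i][j] + bs[i][j]
--
--     res = 0
--     for i in range(K + 1):
--         for j in range(K + 1):
--             u = csw[-1][-1] - csw[i][-1] - csw[-1][j] + csw[i][j] * 2
--             v = csb[i][-1] + csb[-1][j] - csb[i][j] * 2
--             res = max(res, u + v)
--             u = csb[-1][-1] - csb[i][-1] - csb[-1][j] + csb[i][j] * 2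
--             v = csw[i][-1] + csw[-1][j] - csw[i][j] * 2
--             res = max(res, u + v)
--
--     return res
-- ===== SOURCE B (Python) =====
-- def max_satisfied_desires(N, K, desires):
--     # Event/difference-array formulation: each desire marks, as rectangle updates
--     # on the (i, j) shift plane, exactly the set of shifts that satisfy it; one
--     # running 2D integration sweep then finds the best shift (for both colour
--     # orientations, since the two orientations' scores sum to the usable total m).
--     size = K + 2
--     diff = [[0] * size for _ in range(size)]
--
--     def add_rect(a1, b1, a2, b2):
--         diff[a1][b1] += 1
--         diff[a1][b2 + 1] -= 1
--         diff[a2 + 1][b1] -= 1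
--         diff[a2 + 1][b2 + 1] += 1
--
--     m = 0
--     for (x, y, c) in desires:
--         if c != 'W' and c != 'B':
--             continue
--         flip = (x // K + y // K) % 2 == 1
--         white = (c == 'W') != flip
--         r = y % K
--         q = x % K
--         m += 1
--         if white:
--             add_rect(0, 0, r, q)
--             add_rect(r + 1, q + 1, K, K)
--         else:
--             add_rect(0, q + 1, r, K)
--             add_rect(r + 1, 0, K, q)
--
--     res = 0
--     colacc = [0] * (K + 1)
--     for i in range(K + 1):
--         s = 0
--         for j in range(K + 1):
--             colacc[j] += diff[i][j]
--             s += colacc[j]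
--             res = max(res, s, m - s)
--     return res
-- ===== Notes on version B (the rewrite author's own statement) =====
-- stated objective: alternative
-- what changed: Instead of binning desires into a KxK cell-count grid, building two 2D prefix-sum tables and evaluating an 8-term inclusion-exclusion formula at every shift, B scatters each desire directly as rectangle updates into a 2D difference array over the shift plane (the rectangles of shifts that satisfy it) and recovers every shift's score with a single running column-accumulator integration sweep, using that the two colour orientations' scores sum to the usable total m.
import Mathlib
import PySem

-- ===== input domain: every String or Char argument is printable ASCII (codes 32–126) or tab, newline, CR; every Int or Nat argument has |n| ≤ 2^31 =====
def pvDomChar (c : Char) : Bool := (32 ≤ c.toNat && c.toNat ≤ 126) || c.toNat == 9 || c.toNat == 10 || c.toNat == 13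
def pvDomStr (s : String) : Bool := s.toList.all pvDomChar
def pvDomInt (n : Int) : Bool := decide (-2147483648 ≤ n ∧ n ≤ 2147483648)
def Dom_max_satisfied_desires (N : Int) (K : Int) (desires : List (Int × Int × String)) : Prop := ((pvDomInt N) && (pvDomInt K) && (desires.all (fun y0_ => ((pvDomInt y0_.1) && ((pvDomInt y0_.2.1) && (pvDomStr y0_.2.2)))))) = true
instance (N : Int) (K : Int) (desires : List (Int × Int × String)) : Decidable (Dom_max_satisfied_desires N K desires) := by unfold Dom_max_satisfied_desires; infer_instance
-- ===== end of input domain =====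

-- B replaces A's cell-count grid + two 2D prefix-sum tables + 8-term per-shift formula by
-- scattering each desire as rectangle updates into one 2D difference array over the shift
-- plane and a single running-integration sweep (objective: alternative).

-- shared indexing helpers (exact Python semantics where Python succeeds;
-- the 0/[] defaults are only reachable where Python raises, which Pre_ excludes)
-- t[i][j] read
def pvGet2 (t : List (List Int)) (i j : Int) : Int :=
  PySem.List.pyGetD (PySem.List.pyGetD t i []) j 0

-- t[i][j] = v; used only with 0 ≤ i, 0 ≤ j in range
def pvSet2 (t : List (List Int)) (i j : Int) (v : Int) : List (List Int) :=
  t.set i.toNat ((PySem.List.pyGetD t i []).set j.toNat v)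

-- [[0] * n for _ in range(n)]
def pvZeros (n : Int) : List (List Int) :=
  List.replicate n.toNat (List.replicate n.toNat 0)

-- ===== PORT A =====
-- the colour swap 'if t % 2: ...' (t % 2 is 0 or 1; truthy iff non-zero)
def pvEffColour (K x y : Int) (c : String) : String :=
  if PySem.Int.mod (PySem.Int.floordiv x K + PySem.Int.floordiv y K) 2 ≠ 0 then
    if c = "W" then "B" else if c = "B" then "W" else c
  else c

-- the recurrence line 'cs[i+1][j+1] = cs[i+1][j] + cs[i][j+1] - cs[i][j] + cell[i][j]'
def pvPrefStep (cell : List (List Int)) (i : Int) (cs : List (List Int)) (j : Int) :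
    List (List Int) :=
  pvSet2 cs (i + 1) (j + 1)
    (pvGet2 cs (i + 1) j + pvGet2 cs i (j + 1) - pvGet2 cs i j + pvGet2 cell i j)

-- loop body of A's first pass
def pvStepA (K : Int) (st : List (List Int) × List (List Int)) (d : Int × Int × String) :
    List (List Int) × List (List Int) :=
  let c := pvEffColour K d.1 d.2.1 d.2.2
  let r := PySem.Int.mod d.2.1 K
  let q := PySem.Int.mod d.1 K
  (pvSet2 st.1 r q (pvGet2 st.1 r q + (if c = "W" then 1 else 0)),
   pvSet2 st.2 r q (pvGet2 st.2 r q + (if c = "B" then 1 else 0)))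

def pvPhase1A (K : Int) (desires : List (Int × Int × String)) :
    List (List Int) × List (List Int) :=
  desires.foldl (pvStepA K) (pvZeros K, pvZeros K)

-- A's single loop filling csw and csb together
def pvPrefixA (K : Int) (w b : List (List Int)) :
    List (List Int) × List (List Int) :=
  (PySem.List.pyRange 0 K 1).foldl
    (fun cs i =>
      (PySem.List.pyRange 0 K 1).foldl
        (fun cs j => (pvPrefStep w i cs.1 j, pvPrefStep b i cs.2 j)) cs)
    (pvZeros (K + 1), pvZeros (K + 1))

def max_satisfied_desires (N : Int) (K : Int) (desires : List (Int × Int × String)) : Int :=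
  let p := pvPhase1A K desires
  let cs := pvPrefixA K p.1 p.2
  let csw := cs.1
  let csb := cs.2
  (PySem.List.pyRange 0 (K + 1) 1).foldl
    (fun res i =>
      (PySem.List.pyRange 0 (K + 1) 1).foldl
        (fun res j =>
          let res1 := max res (pvGet2 csw (-1) (-1) - pvGet2 csw i (-1) - pvGet2 csw (-1) j +
                               pvGet2 csw i j * 2 +
                               (pvGet2 csb i (-1) + pvGet2 csb (-1) j - pvGet2 csb i j * 2))
          max res1 (pvGet2 csb (-1) (-1) - pvGet2 csb i (-1) - pvGet2 csb (-1) j +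
                    pvGet2 csb i j * 2 +
                    (pvGet2 csw i (-1) + pvGet2 csw (-1) j - pvGet2 csw i j * 2))) res)
    0

-- ===== PORT B =====
-- diff[i][j] += δ
def pvAddAt (t : List (List Int)) (i j δ : Int) : List (List Int) :=
  pvSet2 t i j (pvGet2 t i j + δ)

-- add_rect(a1, b1, a2, b2)
def pvAddRect (t : List (List Int)) (a1 b1 a2 b2 : Int) : List (List Int) :=
  pvAddAt (pvAddAt (pvAddAt (pvAddAt t a1 b1 1) a1 (b2 + 1) (-1)) (a2 + 1) b1 (-1))
    (a2 + 1) (b2 + 1) 1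

-- loop body of B's first pass over desires
def pvStepB (K : Int) (st : List (List Int) × Int) (d : Int × Int × String) :
    List (List Int) × Int :=
  if d.2.2 ≠ "W" ∧ d.2.2 ≠ "B" then st
  else
    let flip : Bool :=
      decide (PySem.Int.mod (PySem.Int.floordiv d.1 K + PySem.Int.floordiv d.2.1 K) 2 = 1)
    let white : Bool := decide (d.2.2 = "W") != flip
    let r := PySem.Int.mod d.2.1 K
    let q := PySem.Int.mod d.1 K
    if white then (pvAddRect (pvAddRect st.1 0 0 r q) (r + 1) (q + 1) K K, st.2 + 1)
    else (pvAddRect (pvAddRect st.1 0 (q + 1) r K) (r + 1) 0 K q, st.2 + 1)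

def max_satisfied_desires_alt (N : Int) (K : Int) (desires : List (Int × Int × String)) : Int :=
  let p := desires.foldl (pvStepB K) (pvZeros (K + 2), 0)
  let diff := p.1
  let m := p.2
  ((PySem.List.pyRange 0 (K + 1) 1).foldl
    (fun st i =>
      let inner := (PySem.List.pyRange 0 (K + 1) 1).foldl
        (fun st2 j =>
          let ca := st2.1.set j.toNat (PySem.List.pyGetD st2.1 j 0 + pvGet2 diff i j)
          let s := st2.2.1 + PySem.List.pyGetD ca j 0
          (ca, s, max (max st2.2.2 s) (m - s)))
        (st.1, 0, st.2)
      (inner.1, inner.2.2))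
    (List.replicate (K + 1).toNat 0, 0)).2

-- ===== PRECONDITION & SPEC =====
-- Pre_ excludes K ≤ 0 with a nonempty desires list, where A raises
-- (ZeroDivisionError at K = 0, IndexError at K < 0); A returns on everything else.
def Pre_max_satisfied_desires (N : Int) (K : Int) (desires : List (Int × Int × String)) : Prop :=
  1 ≤ K ∨ desires = []
instance (N : Int) (K : Int) (desires : List (Int × Int × String)) : Decidable (Pre_max_satisfied_desires N K desires) := by unfold Pre_max_satisfied_desires; infer_instance

def pvWitness_max_satisfied_desires : Int × Int × (List (Int × Int × String)) :=
  (3, 2, [(0, 1, "W"), (4, 3, "B"), (-1, 2, "W")])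

def Spec_max_satisfied_desires (N : Int) (K : Int) (desires : List (Int × Int × String)) (out : Int) : Prop := out = max_satisfied_desires_alt N K desires
instance (N : Int) (K : Int) (desires : List (Int × Int × String)) (out : Int) : Decidable (Spec_max_satisfied_desires N K desires out) := by unfold Spec_max_satisfied_desires; infer_instance

-- ===== CLAIM (what is proved, stated in full; the proofs are below) =====
def Claim_equal_max_satisfied_desires : Prop := ∀ (N : Int) (K : Int) (desires : List (Int × Int × String)), Dom_max_satisfied_desires N K desires → Pre_max_satisfied_desires N K desires → Spec_max_satisfied_desires N K desires (max_satisfied_desires N K desires)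

-- ===== LEMMAS AND PROOFS =====

-- ---------- generic list/table facts ----------

theorem pyGetD_set_nonneg {α : Type} (t : List α) (n : Nat) (x d : α) (a : Int) (ha : 0 ≤ a) :
    PySem.List.pyGetD (t.set n x) a d =
      if (n : Int) = a ∧ n < t.length then x else PySem.List.pyGetD t a d := by
  rw [PySem.List.pyGetD_of_nonneg _ _ ha, PySem.List.pyGetD_of_nonneg _ _ ha,
    List.getD_eq_getElem?_getD, List.getD_eq_getElem?_getD, List.getElem?_set]
  by_cases h1 : n = a.toNat
  · by_cases h2 : n < t.length
    · rw [if_pos h1, if_pos h2, if_pos (by omega)]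
      rfl
    · rw [if_pos h1, if_neg h2, if_neg (by omega), List.getElem?_eq_none (by omega)]
  · rw [if_neg h1, if_neg (by omega)]

theorem getD_set' (l : List Int) (ns nr : Nat) (x : Int) :
    (l.set ns x).getD nr 0 = if ns = nr ∧ ns < l.length then x else l.getD nr 0 := by
  rw [List.getD_eq_getElem?_getD, List.getD_eq_getElem?_getD, List.getElem?_set]
  by_cases h1 : ns = nr
  · by_cases h2 : ns < l.length
    · rw [if_pos h1, if_pos h2, if_pos ⟨h1, h2⟩]
      rfl
    · rw [if_pos h1, if_neg h2, if_neg (by tauto), List.getElem?_eq_none (by omega)]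
  · rw [if_neg h1, if_neg (by tauto)]

theorem pyGetD_replicate_or {α : Type} (m : Nat) (x d : α) (a : Int) :
    PySem.List.pyGetD (List.replicate m x) a d = x ∨
      PySem.List.pyGetD (List.replicate m x) a d = d := by
  unfold PySem.List.pyGetD
  cases h : PySem.List.pyGet? (List.replicate m x) a with
  | none => right; rfl
  | some y =>
    left
    have := PySem.List.mem_of_pyGet?_eq_some _ h
    simp [List.eq_of_mem_replicate this]

theorem pyGetD_nil_int (b : Int) : PySem.List.pyGetD ([] : List Int) b 0 = 0 := by
  unfold PySem.List.pyGetD PySem.List.pyGet? PySem.List.pyIdx?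
  split_ifs <;> simp

theorem pvGet2_zeros (n : Int) (a b : Int) : pvGet2 (pvZeros n) a b = 0 := by
  unfold pvGet2 pvZeros
  rcases pyGetD_replicate_or n.toNat (List.replicate n.toNat (0 : Int)) [] a with h | h <;> rw [h]
  · rcases pyGetD_replicate_or n.toNat (0 : Int) 0 b with h2 | h2 <;> rw [h2]
  · exact pyGetD_nil_int b

-- a rectangular n × n table
def pvRect (t : List (List Int)) (n : Nat) : Prop :=
  t.length = n ∧ ∀ a : Nat, a < n → (t.getD a []).length = n

theorem pvRect_zeros (m : Int) : pvRect (pvZeros m) m.toNat := by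
  unfold pvRect pvZeros
  refine ⟨by simp, fun a ha => ?_⟩
  rw [List.getD_eq_getElem?_getD, List.getElem?_replicate, if_pos ha]
  simp

theorem pvRect_set2 (t : List (List Int)) (n : Nat) (i j v : Int)
    (ht : pvRect t n) (hi : 0 ≤ i) (_hi' : i < (n : Int)) :
    pvRect (pvSet2 t i j v) n := by
  obtain ⟨hlen, hrow⟩ := ht
  refine ⟨by simp [pvSet2, hlen], fun a ha => ?_⟩
  unfold pvSet2
  rw [List.getD_eq_getElem?_getD, List.getElem?_set]
  by_cases h : i.toNat = a
  · rw [if_pos h, if_pos (by omega)]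
    simp only [Option.getD_some]
    rw [List.length_set, PySem.List.pyGetD_of_nonneg _ _ hi]
    exact hrow i.toNat (by omega)
  · rw [if_neg h]
    rw [← List.getD_eq_getElem?_getD]
    exact hrow a ha

-- reading a written cell (indices in range, reads at nonneg indices)
theorem pvGet2_set2 (t : List (List Int)) (n : Nat) (i j v : Int) (ht : pvRect t n)
    (hi : 0 ≤ i) (hi' : i < (n : Int)) (hj : 0 ≤ j) (hj' : j < (n : Int))
    (a b : Int) (ha : 0 ≤ a) (hb : 0 ≤ b) :
    pvGet2 (pvSet2 t i j v) a b = if a = i ∧ b = j then v else pvGet2 t a b := by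
  obtain ⟨hlen, hrow⟩ := ht
  unfold pvGet2 pvSet2
  rw [pyGetD_set_nonneg _ _ _ _ _ ha]
  by_cases hai : a = i
  · subst hai
    rw [if_pos (by constructor <;> omega)]
    rw [pyGetD_set_nonneg _ _ _ _ _ hb]
    have hrl : (PySem.List.pyGetD t a []).length = n := by
      rw [PySem.List.pyGetD_of_nonneg _ _ hi]
      exact hrow a.toNat (by omega)
    by_cases hbj : b = j
    · rw [if_pos (by constructor <;> omega), if_pos ⟨rfl, hbj⟩]
    · rw [if_neg (by omega), if_neg (by tauto)]
  · rw [if_neg (by omega), if_neg (by tauto)]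

-- the rectangle sum Σ_{i<a} Σ_{j<b} t[i][j] : the common semantics of every table in sight
def pvS (t : List (List Int)) (a b : Nat) : Int :=
  ∑ i ∈ Finset.range a, ∑ j ∈ Finset.range b, pvGet2 t i j

theorem pvS_rec (t : List (List Int)) (a b : Nat) :
    pvS t (a + 1) (b + 1) = pvS t (a + 1) b + pvS t a (b + 1) - pvS t a b + pvGet2 t a b := by
  simp [pvS, Finset.sum_range_succ]
  ring

theorem pvS_zeros (n : Int) (a b : Nat) : pvS (pvZeros n) a b = 0 := by
  simp [pvS, pvGet2_zeros]

theorem pvS_succ_col (t : List (List Int)) (a b : Nat) :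
    pvS t a (b + 1) = pvS t a b + ∑ p ∈ Finset.range a, pvGet2 t p b := by
  simp [pvS, Finset.sum_range_succ, Finset.sum_add_distrib]

theorem sum_ite_single (b : Nat) (j : Int) (hj : 0 ≤ j) (c : Int) :
    (∑ q ∈ Finset.range b, if (q : Int) = j then c else 0) = if j < (b : Int) then c else 0 := by
  induction b with
  | zero =>
    simp
    intro h
    omega
  | succ b ih =>
    rw [Finset.sum_range_succ, ih]
    split_ifs <;> omega

theorem pvS_set2 (t : List (List Int)) (n : Nat) (i j v : Int) (ht : pvRect t n)
    (hi : 0 ≤ i) (hi' : i < (n : Int)) (hj : 0 ≤ j) (hj' : j < (n : Int)) (a b : Nat) :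
    pvS (pvSet2 t i j v) a b =
      pvS t a b + (if i < (a : Int) ∧ j < (b : Int) then v - pvGet2 t i j else 0) := by
  have hpt : ∀ p q : Nat, pvGet2 (pvSet2 t i j v) (p : Int) (q : Int) =
      pvGet2 t p q + (if (p : Int) = i then (if (q : Int) = j then v - pvGet2 t i j else 0) else 0) := by
    intro p q
    rw [pvGet2_set2 t n i j v ht hi hi' hj hj' p q (by omega) (by omega)]
    by_cases h1 : (p : Int) = i
    · by_cases h2 : (q : Int) = j
      · rw [if_pos ⟨h1, h2⟩, if_pos h1, if_pos h2, ← h1, ← h2]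
        ring
      · simp [h1, h2]
    · simp [h1]
  have hrow : ∀ p : Nat, (∑ q ∈ Finset.range b, pvGet2 (pvSet2 t i j v) (p : Int) (q : Int)) =
      (∑ q ∈ Finset.range b, pvGet2 t p q) +
        (if (p : Int) = i then (if j < (b : Int) then v - pvGet2 t i j else 0) else 0) := by
    intro p
    simp only [hpt]
    rw [Finset.sum_add_distrib]
    congr 1
    by_cases h1 : (p : Int) = i
    · simp only [h1, if_true]
      exact sum_ite_single b j hj _
    · simp [h1]
  unfold pvS
  rw [Finset.sum_congr rfl (fun p _ => hrow p), Finset.sum_add_distrib]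
  congr 1
  rw [sum_ite_single a i hi _]
  split_ifs <;> first | rfl | omega

-- negative index -1 is the last row / column
theorem pyGetD_neg_one {α : Type} (xs : List α) (d : α) (h : 1 ≤ xs.length) :
    PySem.List.pyGetD xs (-1) d = xs.getD (xs.length - 1) d := by
  unfold PySem.List.pyGetD
  rw [PySem.List.pyGet?_neg xs (by omega) (by omega)]
  rw [List.getD_eq_getElem?_getD]
  norm_num

theorem pvGet2_neg_left (t : List (List Int)) (n : Nat) (ht : pvRect t n) (hn : 1 ≤ n)
    (b : Int) : pvGet2 t (-1) b = pvGet2 t ((n : Int) - 1) b := by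
  obtain ⟨hlen, _⟩ := ht
  unfold pvGet2
  rw [pyGetD_neg_one t [] (by omega),
    PySem.List.pyGetD_of_nonneg _ _ (show (0:Int) ≤ (n : Int) - 1 by omega)]
  congr 2
  omega

theorem pvGet2_neg_right (t : List (List Int)) (n : Nat) (ht : pvRect t n) (hn : 1 ≤ n)
    (a : Int) (ha : 0 ≤ a) (ha' : a < (n : Int)) :
    pvGet2 t a (-1) = pvGet2 t a ((n : Int) - 1) := by
  obtain ⟨hlen, hrow⟩ := ht
  unfold pvGet2
  have hr : (PySem.List.pyGetD t a []).length = n := by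
    rw [PySem.List.pyGetD_of_nonneg _ _ ha]
    exact hrow a.toNat (by omega)
  rw [pyGetD_neg_one _ _ (by omega), hr,
    PySem.List.pyGetD_of_nonneg _ _ (show (0:Int) ≤ (n : Int) - 1 by omega)]
  congr 1
  omega

-- ---------- A-side: closed form of the prefix tables ----------

-- the single-table version of A's prefix loop (used to analyse pvPrefixA)
def pvPrefix2 (K : Int) (cell : List (List Int)) : List (List Int) :=
  (PySem.List.pyRange 0 K 1).foldl
    (fun cs i => (PySem.List.pyRange 0 K 1).foldl (pvPrefStep cell i) cs)
    (pvZeros (K + 1))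

theorem pvRect_prefStep (cell U : List (List Int)) (n : Nat) (i j : Int) (hU : pvRect U n)
    (hi : 0 ≤ i) (hi' : i + 1 < (n : Int)) : pvRect (pvPrefStep cell i U j) n := by
  unfold pvPrefStep
  exact pvRect_set2 U n (i + 1) (j + 1) _ hU (by omega) (by omega)

theorem pvGet2_prefStep (cell U : List (List Int)) (n : Nat) (i j : Int) (hU : pvRect U n)
    (hi : 0 ≤ i) (hi' : i + 1 < (n : Int)) (hj : 0 ≤ j) (hj' : j + 1 < (n : Int))
    (x y : Int) (hx : 0 ≤ x) (hy : 0 ≤ y) :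
    pvGet2 (pvPrefStep cell i U j) x y =
      if x = i + 1 ∧ y = j + 1 then
        pvGet2 U (i + 1) j + pvGet2 U i (j + 1) - pvGet2 U i j + pvGet2 cell i j
      else pvGet2 U x y := by
  unfold pvPrefStep
  exact pvGet2_set2 U n (i + 1) (j + 1) _ hU (by omega) (by omega) (by omega) (by omega) x y hx hy

theorem prefix2_closed (K : Int) (cell : List (List Int)) (hK : 0 ≤ K) :
    pvRect (pvPrefix2 K cell) (K + 1).toNat ∧
      ∀ x y : Int, 0 ≤ x → 0 ≤ y → pvGet2 (pvPrefix2 K cell) x y =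
        if x ≤ K ∧ y ≤ K then pvS cell x.toNat y.toNat else 0 := by
  unfold pvPrefix2
  have inner : ∀ (r : Nat), (r : Int) < K → ∀ (cs : List (List Int)),
      pvRect cs (K + 1).toNat →
      (∀ x y : Int, 0 ≤ x → 0 ≤ y → pvGet2 cs x y =
        if x ≤ (r : Int) ∧ y ≤ K then pvS cell x.toNat y.toNat else 0) →
      ∀ c : Nat, (c : Int) ≤ K →
        pvRect ((PySem.List.pyRange 0 (c : Int) 1).foldl (pvPrefStep cell (r : Int)) cs)
          (K + 1).toNat ∧
        (∀ x y : Int, 0 ≤ x → 0 ≤ y →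
          pvGet2 ((PySem.List.pyRange 0 (c : Int) 1).foldl (pvPrefStep cell (r : Int)) cs) x y =
            if x ≤ (r : Int) + 1 ∧ y ≤ K ∧ (x ≤ (r : Int) ∨ y ≤ (c : Int)) then
              pvS cell x.toNat y.toNat else 0) := by
    intro r hr cs hcsR hcs c
    induction c with
    | zero =>
      intro _
      rw [show PySem.List.pyRange 0 ((0 : Nat) : Int) 1 = [] from
        PySem.List.pyRange_one_eq_nil (by omega)]
      simp only [List.foldl_nil]
      refine ⟨hcsR, fun x y hx hy => ?_⟩
      rw [hcs x y hx hy]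
      split_ifs with h1 h2 h2 <;> try rfl
      · omega
      · rw [show y.toNat = 0 by omega]
        simp [pvS]
    | succ c ih =>
      intro hc
      push_cast at *
      obtain ⟨uR, uread⟩ := ih (by omega)
      rw [PySem.List.pyRange_one_succ_right (by omega), List.foldl_append]
      simp only [List.foldl_cons, List.foldl_nil]
      refine ⟨pvRect_prefStep _ _ _ _ _ uR (by omega) (by omega), fun x y hx hy => ?_⟩
      rw [pvGet2_prefStep cell _ ((K + 1).toNat) ((r : Int)) ((c : Int)) uR (by omega) (by omega)
        (by omega) (by omega) x y hx hy]
      have e1 : pvGet2 ((PySem.List.pyRange 0 (c : Int) 1).foldl (pvPrefStep cell (r : Int)) cs)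
          ((r : Int) + 1) (c : Int) = pvS cell (r + 1) c := by
        rw [uread _ _ (by omega) (by omega), if_pos (by omega),
          show ((r : Int) + 1).toNat = r + 1 by omega, show ((c : Int)).toNat = c by omega]
      have e2 : pvGet2 ((PySem.List.pyRange 0 (c : Int) 1).foldl (pvPrefStep cell (r : Int)) cs)
          ((r : Int)) ((c : Int) + 1) = pvS cell r (c + 1) := by
        rw [uread _ _ (by omega) (by omega), if_pos (by omega),
          show ((r : Int)).toNat = r by omega, show ((c : Int) + 1).toNat = c + 1 by omega]
      have e3 : pvGet2 ((PySem.List.pyRange 0 (c : Int) 1).foldl (pvPrefStep cell (r : Int)) cs)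
          ((r : Int)) ((c : Int)) = pvS cell r c := by
        rw [uread _ _ (by omega) (by omega), if_pos (by omega),
          show ((r : Int)).toNat = r by omega, show ((c : Int)).toNat = c by omega]
      rw [e1, e2, e3]
      by_cases hxy : x = (r : Int) + 1 ∧ y = (c : Int) + 1
      · rw [if_pos hxy, if_pos (by omega)]
        obtain ⟨hx', hy'⟩ := hxy
        rw [show x.toNat = r + 1 by omega, show y.toNat = c + 1 by omega, pvS_rec]
      · rw [if_neg hxy, uread x y hx hy]
        split_ifs <;> first | rfl | omega
  have outer : ∀ r : Nat, (r : Int) ≤ K →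
      pvRect ((PySem.List.pyRange 0 (r : Int) 1).foldl
        (fun cs i => (PySem.List.pyRange 0 K 1).foldl (pvPrefStep cell i) cs)
        (pvZeros (K + 1))) (K + 1).toNat ∧
      (∀ x y : Int, 0 ≤ x → 0 ≤ y →
        pvGet2 ((PySem.List.pyRange 0 (r : Int) 1).foldl
          (fun cs i => (PySem.List.pyRange 0 K 1).foldl (pvPrefStep cell i) cs)
          (pvZeros (K + 1))) x y =
          if x ≤ (r : Int) ∧ y ≤ K then pvS cell x.toNat y.toNat else 0) := by
    intro r
    induction r with
    | zero =>
      intro _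
      rw [show PySem.List.pyRange 0 ((0 : Nat) : Int) 1 = [] from
        PySem.List.pyRange_one_eq_nil (by omega)]
      simp only [List.foldl_nil]
      refine ⟨pvRect_zeros (K + 1), fun x y hx hy => ?_⟩
      rw [pvGet2_zeros]
      split_ifs with h
      · rw [show x.toNat = 0 by omega]
        simp [pvS]
      · rfl
    | succ r ihr =>
      intro hr
      push_cast at *
      obtain ⟨TR, Tread⟩ := ihr (by omega)
      rw [PySem.List.pyRange_one_succ_right (by omega), List.foldl_append]
      simp only [List.foldl_cons, List.foldl_nil]
      have hinner := inner r (by omega) _ TR Tread K.toNat (by omega)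
      rw [show ((K.toNat : Nat) : Int) = K by omega] at hinner
      obtain ⟨hiR, hiread⟩ := hinner
      refine ⟨hiR, fun x y hx hy => ?_⟩
      rw [hiread x y hx hy]
      split_ifs <;> first | rfl | omega
  have h := outer K.toNat (by omega)
  rw [show ((K.toNat : Nat) : Int) = K by omega] at h
  exact h

-- A's paired loop is two copies of the single-table loop
theorem prefixA_eq (K : Int) (w b : List (List Int)) :
    pvPrefixA K w b = (pvPrefix2 K w, pvPrefix2 K b) := by
  unfold pvPrefixA pvPrefix2
  have h : (fun (cs : List (List Int) × List (List Int)) i =>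
        (PySem.List.pyRange 0 K 1).foldl
          (fun cs j => (pvPrefStep w i cs.1 j, pvPrefStep b i cs.2 j)) cs) =
      fun cs i => ((PySem.List.pyRange 0 K 1).foldl (pvPrefStep w i) cs.1,
        (PySem.List.pyRange 0 K 1).foldl (pvPrefStep b i) cs.2) := by
    funext cs i
    rcases cs with ⟨cw, cb⟩
    exact PySem.List.foldl_prod_mk (pvPrefStep w i) (pvPrefStep b i) _ cw cb
  rw [h]
  exact PySem.List.foldl_prod_mk
    (fun c i => (PySem.List.pyRange 0 K 1).foldl (pvPrefStep w i) c)
    (fun c i => (PySem.List.pyRange 0 K 1).foldl (pvPrefStep b i) c) _ _ _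

-- ---------- per-desire indicator layer (the common semantics of both programs) ----------

-- desire d counts as an (effective) white / black point inside the a × b corner
def pvWInd (K : Int) (a b : Nat) (d : Int × Int × String) : Int :=
  if pvEffColour K d.1 d.2.1 d.2.2 = "W" ∧ PySem.Int.mod d.2.1 K < (a : Int) ∧
      PySem.Int.mod d.1 K < (b : Int) then 1 else 0

def pvBInd (K : Int) (a b : Nat) (d : Int × Int × String) : Int :=
  if pvEffColour K d.1 d.2.1 d.2.2 = "B" ∧ PySem.Int.mod d.2.1 K < (a : Int) ∧
      PySem.Int.mod d.1 K < (b : Int) then 1 else 0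

-- contribution of one difference-array write to the a × b corner sum
def pvI (a b : Nat) (p q δ : Int) : Int :=
  if p < (a : Int) ∧ q < (b : Int) then δ else 0

-- contribution of one add_rect to the a × b corner sum
def pvRIndD (a b : Nat) (a1 b1 a2 b2 : Int) : Int :=
  pvI a b a1 b1 1 + pvI a b a1 (b2 + 1) (-1) + pvI a b (a2 + 1) b1 (-1) +
    pvI a b (a2 + 1) (b2 + 1) 1

-- contribution of one desire to the a × b corner sum of B's difference array
def pvCInd (K : Int) (a b : Nat) (d : Int × Int × String) : Int :=
  if d.2.2 ≠ "W" ∧ d.2.2 ≠ "B" then 0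
  else if (decide (d.2.2 = "W") !=
      decide (PySem.Int.mod (PySem.Int.floordiv d.1 K + PySem.Int.floordiv d.2.1 K) 2 = 1)) then
    pvRIndD a b 0 0 (PySem.Int.mod d.2.1 K) (PySem.Int.mod d.1 K) +
      pvRIndD a b (PySem.Int.mod d.2.1 K + 1) (PySem.Int.mod d.1 K + 1) K K
  else
    pvRIndD a b 0 (PySem.Int.mod d.1 K + 1) (PySem.Int.mod d.2.1 K) K +
      pvRIndD a b (PySem.Int.mod d.2.1 K + 1) 0 K (PySem.Int.mod d.1 K)

-- contribution of one desire to B's counter m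
def pvMInd (d : Int × Int × String) : Int :=
  if d.2.2 ≠ "W" ∧ d.2.2 ≠ "B" then 0 else 1

-- ---------- sums over the desires list ----------

theorem pv_sum_add {α : Type} (l : List α) (f g : α → Int) :
    (l.map (fun d => f d + g d)).sum = (l.map f).sum + (l.map g).sum := by
  induction l with
  | nil => simp
  | cons x xs ih => simp only [List.map_cons, List.sum_cons, ih]; ring

theorem pv_sum_comb {α : Type} (l : List α) (w1 w2 w3 w4 b1 b2 b3 : α → Int) :
    (l.map (fun d => w1 d - w2 d - w3 d + 2 * w4 d + b1 d + b2 d - 2 * b3 d)).sum =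
      (l.map w1).sum - (l.map w2).sum - (l.map w3).sum + 2 * (l.map w4).sum +
        (l.map b1).sum + (l.map b2).sum - 2 * (l.map b3).sum := by
  induction l with
  | nil => simp
  | cons x xs ih => simp only [List.map_cons, List.sum_cons, ih]; ring

-- ---------- A's first pass, summed ----------

theorem stepA_invar (K : Int) (hK : 1 ≤ K) (s : List (List Int) × List (List Int))
    (d : Int × Int × String) (h1 : pvRect s.1 K.toNat) (h2 : pvRect s.2 K.toNat) (a b : Nat) :
    pvRect (pvStepA K s d).1 K.toNat ∧ pvRect (pvStepA K s d).2 K.toNat ∧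
    pvS (pvStepA K s d).1 a b = pvS s.1 a b + pvWInd K a b d ∧
    pvS (pvStepA K s d).2 a b = pvS s.2 a b + pvBInd K a b d := by
  have hr0 : (0:Int) ≤ PySem.Int.mod d.2.1 K := PySem.Int.mod_nonneg _ (by omega)
  have hrK : PySem.Int.mod d.2.1 K < ((K.toNat : Nat) : Int) := by
    have := PySem.Int.mod_lt d.2.1 (show (0:Int) < K by omega)
    omega
  have hq0 : (0:Int) ≤ PySem.Int.mod d.1 K := PySem.Int.mod_nonneg _ (by omega)
  have hqK : PySem.Int.mod d.1 K < ((K.toNat : Nat) : Int) := by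
    have := PySem.Int.mod_lt d.1 (show (0:Int) < K by omega)
    omega
  simp only [pvStepA]
  refine ⟨pvRect_set2 _ _ _ _ _ h1 hr0 hrK, pvRect_set2 _ _ _ _ _ h2 hr0 hrK, ?_, ?_⟩
  · rw [pvS_set2 _ _ _ _ _ h1 hr0 hrK hq0 hqK]
    unfold pvWInd
    congr 1
    by_cases hC : PySem.Int.mod d.2.1 K < (a:Int) ∧ PySem.Int.mod d.1 K < (b:Int)
    · rw [if_pos hC]
      by_cases hE : pvEffColour K d.1 d.2.1 d.2.2 = "W"
      · rw [if_pos hE, if_pos ⟨hE, hC.1, hC.2⟩]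
        ring
      · rw [if_neg hE, if_neg (by tauto)]
        ring
    · rw [if_neg hC, if_neg (by tauto)]
  · rw [pvS_set2 _ _ _ _ _ h2 hr0 hrK hq0 hqK]
    unfold pvBInd
    congr 1
    by_cases hC : PySem.Int.mod d.2.1 K < (a:Int) ∧ PySem.Int.mod d.1 K < (b:Int)
    · rw [if_pos hC]
      by_cases hE : pvEffColour K d.1 d.2.1 d.2.2 = "B"
      · rw [if_pos hE, if_pos ⟨hE, hC.1, hC.2⟩]
        ring
      · rw [if_neg hE, if_neg (by tauto)]
        ring
    · rw [if_neg hC, if_neg (by tauto)]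

theorem foldA (K : Int) (hK : 1 ≤ K) (a b : Nat) :
    ∀ (ds : List (Int × Int × String)) (s : List (List Int) × List (List Int)),
      pvRect s.1 K.toNat → pvRect s.2 K.toNat →
      pvRect (ds.foldl (pvStepA K) s).1 K.toNat ∧ pvRect (ds.foldl (pvStepA K) s).2 K.toNat ∧
      pvS (ds.foldl (pvStepA K) s).1 a b = pvS s.1 a b + (ds.map (pvWInd K a b)).sum ∧
      pvS (ds.foldl (pvStepA K) s).2 a b = pvS s.2 a b + (ds.map (pvBInd K a b)).sum := by
  intro ds
  induction ds with
  | nil => intro s h1 h2; simp [h1, h2]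
  | cons d ds ih =>
    intro s h1 h2
    obtain ⟨r1, r2, e1, e2⟩ := stepA_invar K hK s d h1 h2 a b
    obtain ⟨R1, R2, E1, E2⟩ := ih (pvStepA K s d) r1 r2
    simp only [List.foldl_cons, List.map_cons, List.sum_cons]
    exact ⟨R1, R2, by rw [E1, e1]; ring, by rw [E2, e2]; ring⟩

-- ---------- B's first pass, summed ----------

theorem pvS_addAt (t : List (List Int)) (n : Nat) (i j δ : Int) (ht : pvRect t n)
    (hi : 0 ≤ i) (hi' : i < (n : Int)) (hj : 0 ≤ j) (hj' : j < (n : Int)) (a b : Nat) :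
    pvRect (pvAddAt t i j δ) n ∧ pvS (pvAddAt t i j δ) a b = pvS t a b + pvI a b i j δ := by
  unfold pvAddAt
  refine ⟨pvRect_set2 _ _ _ _ _ ht hi hi', ?_⟩
  rw [pvS_set2 _ _ _ _ _ ht hi hi' hj hj']
  unfold pvI
  congr 1
  split_ifs <;> ring

theorem pvS_addRect (t : List (List Int)) (n : Nat) (a1 b1 a2 b2 : Int) (ht : pvRect t n)
    (h1 : 0 ≤ a1) (h2 : a1 ≤ a2 + 1) (h3 : a2 + 1 < (n : Int))
    (h4 : 0 ≤ b1) (h5 : b1 ≤ b2 + 1) (h6 : b2 + 1 < (n : Int)) (a b : Nat) :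
    pvRect (pvAddRect t a1 b1 a2 b2) n ∧
    pvS (pvAddRect t a1 b1 a2 b2) a b = pvS t a b + pvRIndD a b a1 b1 a2 b2 := by
  unfold pvAddRect
  obtain ⟨r1, e1⟩ := pvS_addAt t n a1 b1 1 ht h1 (by omega) h4 (by omega) a b
  obtain ⟨r2, e2⟩ := pvS_addAt _ n a1 (b2 + 1) (-1) r1 h1 (by omega) (by omega) h6 a b
  obtain ⟨r3, e3⟩ := pvS_addAt _ n (a2 + 1) b1 (-1) r2 (by omega) h3 h4 (by omega) a b
  obtain ⟨r4, e4⟩ := pvS_addAt _ n (a2 + 1) (b2 + 1) 1 r3 (by omega) h3 (by omega) h6 a b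
  refine ⟨r4, ?_⟩
  rw [e4, e3, e2, e1]
  unfold pvRIndD
  ring

theorem stepB_invar (K : Int) (hK : 1 ≤ K) (st : List (List Int) × Int)
    (d : Int × Int × String) (h : pvRect st.1 (K + 2).toNat) (a b : Nat) :
    pvRect (pvStepB K st d).1 (K + 2).toNat ∧
    pvS (pvStepB K st d).1 a b = pvS st.1 a b + pvCInd K a b d ∧
    (pvStepB K st d).2 = st.2 + pvMInd d := by
  have hr0 : (0:Int) ≤ PySem.Int.mod d.2.1 K := PySem.Int.mod_nonneg _ (by omega)
  have hrK : PySem.Int.mod d.2.1 K < K := PySem.Int.mod_lt _ (by omega)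
  have hq0 : (0:Int) ≤ PySem.Int.mod d.1 K := PySem.Int.mod_nonneg _ (by omega)
  have hqK : PySem.Int.mod d.1 K < K := PySem.Int.mod_lt _ (by omega)
  have hn : (((K + 2).toNat : Nat) : Int) = K + 2 := by omega
  simp only [pvStepB, pvCInd, pvMInd]
  by_cases hs : d.2.2 ≠ "W" ∧ d.2.2 ≠ "B"
  · rw [if_pos hs, if_pos hs, if_pos hs]
    exact ⟨h, by ring, by ring⟩
  · rw [if_neg hs, if_neg hs, if_neg hs]
    by_cases hw : (decide (d.2.2 = "W") !=
        decide (PySem.Int.mod (PySem.Int.floordiv d.1 K + PySem.Int.floordiv d.2.1 K) 2 = 1)) = true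
    · rw [if_pos hw, if_pos hw]
      obtain ⟨R1, E1⟩ := pvS_addRect st.1 (K + 2).toNat 0 0
        (PySem.Int.mod d.2.1 K) (PySem.Int.mod d.1 K) h
        (by omega) (by omega) (by omega) (by omega) (by omega) (by omega) a b
      obtain ⟨R2, E2⟩ := pvS_addRect _ (K + 2).toNat (PySem.Int.mod d.2.1 K + 1)
        (PySem.Int.mod d.1 K + 1) K K R1
        (by omega) (by omega) (by omega) (by omega) (by omega) (by omega) a b
      exact ⟨R2, by rw [E2, E1]; ring, rfl⟩
    · rw [if_neg hw, if_neg hw]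
      obtain ⟨R1, E1⟩ := pvS_addRect st.1 (K + 2).toNat 0 (PySem.Int.mod d.1 K + 1)
        (PySem.Int.mod d.2.1 K) K h
        (by omega) (by omega) (by omega) (by omega) (by omega) (by omega) a b
      obtain ⟨R2, E2⟩ := pvS_addRect _ (K + 2).toNat (PySem.Int.mod d.2.1 K + 1) 0 K
        (PySem.Int.mod d.1 K) R1
        (by omega) (by omega) (by omega) (by omega) (by omega) (by omega) a b
      exact ⟨R2, by rw [E2, E1]; ring, rfl⟩

theorem foldB (K : Int) (hK : 1 ≤ K) (a b : Nat) :
    ∀ (ds : List (Int × Int × String)) (st : List (List Int) × Int),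
      pvRect st.1 (K + 2).toNat →
      pvRect (ds.foldl (pvStepB K) st).1 (K + 2).toNat ∧
      pvS (ds.foldl (pvStepB K) st).1 a b = pvS st.1 a b + (ds.map (pvCInd K a b)).sum ∧
      (ds.foldl (pvStepB K) st).2 = st.2 + (ds.map pvMInd).sum := by
  intro ds
  induction ds with
  | nil => intro st h; simp [h]
  | cons d ds ih =>
    intro st h
    obtain ⟨r1, e1, e2⟩ := stepB_invar K hK st d h a b
    obtain ⟨R1, E1, E2⟩ := ih (pvStepB K st d) r1
    simp only [List.foldl_cons, List.map_cons, List.sum_cons]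
    exact ⟨R1, by rw [E1, e1]; ring, by rw [E2, e2]; ring⟩

-- ---------- pointwise identity between the two per-desire contributions ----------

set_option maxHeartbeats 2000000 in
theorem pvRIndD_eval (i j a1 b1 a2 b2 : Int) (hi : 0 ≤ i) (hj : 0 ≤ j)
    (h1 : a1 ≤ a2 + 1) (h2 : b1 ≤ b2 + 1) :
    pvRIndD (i + 1).toNat (j + 1).toNat a1 b1 a2 b2 =
      if a1 ≤ i ∧ i ≤ a2 ∧ b1 ≤ j ∧ j ≤ b2 then 1 else 0 := by
  unfold pvRIndD pvI
  rw [Int.toNat_of_nonneg (show (0:Int) ≤ i + 1 by omega),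
    Int.toNat_of_nonneg (show (0:Int) ≤ j + 1 by omega)]
  split_ifs <;> omega

set_option maxHeartbeats 2000000 in
theorem cInd_eq (K i j : Int) (hK : 1 ≤ K) (hi : 0 ≤ i) (hi' : i ≤ K) (hj : 0 ≤ j)
    (hj' : j ≤ K) (d : Int × Int × String) :
    pvCInd K (i + 1).toNat (j + 1).toNat d =
      pvWInd K K.toNat K.toNat d - pvWInd K i.toNat K.toNat d - pvWInd K K.toNat j.toNat d
        + 2 * pvWInd K i.toNat j.toNat d
        + pvBInd K i.toNat K.toNat d + pvBInd K K.toNat j.toNat d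
        - 2 * pvBInd K i.toNat j.toNat d := by
  obtain ⟨x, y, c⟩ := d
  have hr0 : (0:Int) ≤ PySem.Int.mod y K := PySem.Int.mod_nonneg _ (by omega)
  have hrK : PySem.Int.mod y K < K := PySem.Int.mod_lt _ (by omega)
  have hq0 : (0:Int) ≤ PySem.Int.mod x K := PySem.Int.mod_nonneg _ (by omega)
  have hqK : PySem.Int.mod x K < K := PySem.Int.mod_lt _ (by omega)
  have cK : ((K.toNat : Nat) : Int) = K := by omega
  have ci : ((i.toNat : Nat) : Int) = i := by omega
  have cj : ((j.toNat : Nat) : Int) = j := by omega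
  have hT01 : PySem.Int.mod (PySem.Int.floordiv x K + PySem.Int.floordiv y K) 2 = 0 ∨
      PySem.Int.mod (PySem.Int.floordiv x K + PySem.Int.floordiv y K) 2 = 1 := by
    have hm1 := PySem.Int.mod_nonneg (PySem.Int.floordiv x K + PySem.Int.floordiv y K)
      (show (0:Int) < 2 by omega)
    have hm2 := PySem.Int.mod_lt (PySem.Int.floordiv x K + PySem.Int.floordiv y K)
      (show (0:Int) < 2 by omega)
    omega
  simp only [pvCInd, pvWInd, pvBInd]
  by_cases hW : c = "W"
  · subst hW
    rw [if_neg (show ¬(("W" : String) ≠ "W" ∧ ("W" : String) ≠ "B") by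
      rintro ⟨h, -⟩; exact h rfl)]
    rcases hT01 with h0 | h1
    · have heff : pvEffColour K x y "W" = "W" := by
        unfold pvEffColour
        rw [if_neg (by omega)]
      have hwb : (decide (("W" : String) = "W") !=
          decide (PySem.Int.mod (PySem.Int.floordiv x K + PySem.Int.floordiv y K) 2 = 1)) =
            true := by
        rw [h0]; decide
      rw [if_pos hwb]
      simp only [heff, eq_self_iff_true, true_and, cK, ci, cj]
      rw [pvRIndD_eval i j 0 0 (PySem.Int.mod y K) (PySem.Int.mod x K) hi hj (by omega) (by omega),
        pvRIndD_eval i j (PySem.Int.mod y K + 1) (PySem.Int.mod x K + 1) K K hi hj (by omega)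
          (by omega)]
      rw [if_neg (show ¬(("W" : String) = "B" ∧ PySem.Int.mod y K < i ∧ PySem.Int.mod x K < K) by
            rintro ⟨h, -⟩; exact absurd h (by decide)),
        if_neg (show ¬(("W" : String) = "B" ∧ PySem.Int.mod y K < K ∧ PySem.Int.mod x K < j) by
            rintro ⟨h, -⟩; exact absurd h (by decide)),
        if_neg (show ¬(("W" : String) = "B" ∧ PySem.Int.mod y K < i ∧ PySem.Int.mod x K < j) by
            rintro ⟨h, -⟩; exact absurd h (by decide))]
      split_ifs <;> omega
    · have heff : pvEffColour K x y "W" = "B" := by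
        unfold pvEffColour
        rw [if_pos (by omega), if_pos rfl]
      have hwb : (decide (("W" : String) = "W") !=
          decide (PySem.Int.mod (PySem.Int.floordiv x K + PySem.Int.floordiv y K) 2 = 1)) =
            false := by
        rw [h1]; decide
      rw [if_neg (show ¬((decide (("W" : String) = "W") !=
          decide (PySem.Int.mod (PySem.Int.floordiv x K + PySem.Int.floordiv y K) 2 = 1)) =
            true) by rw [hwb]; decide)]
      simp only [heff, eq_self_iff_true, true_and, cK, ci, cj]
      rw [pvRIndD_eval i j 0 (PySem.Int.mod x K + 1) (PySem.Int.mod y K) K hi hj (by omega)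
          (by omega),
        pvRIndD_eval i j (PySem.Int.mod y K + 1) 0 K (PySem.Int.mod x K) hi hj (by omega)
          (by omega)]
      rw [if_neg (show ¬(("B" : String) = "W" ∧ PySem.Int.mod y K < K ∧ PySem.Int.mod x K < K) by
            rintro ⟨h, -⟩; exact absurd h (by decide)),
        if_neg (show ¬(("B" : String) = "W" ∧ PySem.Int.mod y K < i ∧ PySem.Int.mod x K < K) by
            rintro ⟨h, -⟩; exact absurd h (by decide)),
        if_neg (show ¬(("B" : String) = "W" ∧ PySem.Int.mod y K < K ∧ PySem.Int.mod x K < j) by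
            rintro ⟨h, -⟩; exact absurd h (by decide)),
        if_neg (show ¬(("B" : String) = "W" ∧ PySem.Int.mod y K < i ∧ PySem.Int.mod x K < j) by
            rintro ⟨h, -⟩; exact absurd h (by decide))]
      split_ifs <;> omega
  · by_cases hB : c = "B"
    · subst hB
      rw [if_neg (show ¬(("B" : String) ≠ "W" ∧ ("B" : String) ≠ "B") by
        rintro ⟨-, h⟩; exact h rfl)]
      rcases hT01 with h0 | h1
      · have heff : pvEffColour K x y "B" = "B" := by
          unfold pvEffColour
          rw [if_neg (by omega)]
        have hwb : (decide (("B" : String) = "W") !=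
            decide (PySem.Int.mod (PySem.Int.floordiv x K + PySem.Int.floordiv y K) 2 = 1)) =
              false := by
          rw [h0]; decide
        rw [if_neg (show ¬((decide (("B" : String) = "W") !=
            decide (PySem.Int.mod (PySem.Int.floordiv x K + PySem.Int.floordiv y K) 2 = 1)) =
              true) by rw [hwb]; decide)]
        simp only [heff, eq_self_iff_true, true_and, cK, ci, cj]
        rw [pvRIndD_eval i j 0 (PySem.Int.mod x K + 1) (PySem.Int.mod y K) K hi hj (by omega)
            (by omega),
          pvRIndD_eval i j (PySem.Int.mod y K + 1) 0 K (PySem.Int.mod x K) hi hj (by omega)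
            (by omega)]
        rw [if_neg (show ¬(("B" : String) = "W" ∧ PySem.Int.mod y K < K ∧ PySem.Int.mod x K < K) by
              rintro ⟨h, -⟩; exact absurd h (by decide)),
          if_neg (show ¬(("B" : String) = "W" ∧ PySem.Int.mod y K < i ∧ PySem.Int.mod x K < K) by
              rintro ⟨h, -⟩; exact absurd h (by decide)),
          if_neg (show ¬(("B" : String) = "W" ∧ PySem.Int.mod y K < K ∧ PySem.Int.mod x K < j) by
              rintro ⟨h, -⟩; exact absurd h (by decide)),
          if_neg (show ¬(("B" : String) = "W" ∧ PySem.Int.mod y K < i ∧ PySem.Int.mod x K < j) by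
              rintro ⟨h, -⟩; exact absurd h (by decide))]
        split_ifs <;> omega
      · have heff : pvEffColour K x y "B" = "W" := by
          unfold pvEffColour
          rw [if_pos (by omega), if_neg (by decide), if_pos rfl]
        have hwb : (decide (("B" : String) = "W") !=
            decide (PySem.Int.mod (PySem.Int.floordiv x K + PySem.Int.floordiv y K) 2 = 1)) =
              true := by
          rw [h1]; decide
        rw [if_pos hwb]
        simp only [heff, eq_self_iff_true, true_and, cK, ci, cj]
        rw [pvRIndD_eval i j 0 0 (PySem.Int.mod y K) (PySem.Int.mod x K) hi hj (by omega)
            (by omega),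
          pvRIndD_eval i j (PySem.Int.mod y K + 1) (PySem.Int.mod x K + 1) K K hi hj (by omega)
            (by omega)]
        rw [if_neg (show ¬(("W" : String) = "B" ∧ PySem.Int.mod y K < i ∧ PySem.Int.mod x K < K) by
              rintro ⟨h, -⟩; exact absurd h (by decide)),
          if_neg (show ¬(("W" : String) = "B" ∧ PySem.Int.mod y K < K ∧ PySem.Int.mod x K < j) by
              rintro ⟨h, -⟩; exact absurd h (by decide)),
          if_neg (show ¬(("W" : String) = "B" ∧ PySem.Int.mod y K < i ∧ PySem.Int.mod x K < j) by
              rintro ⟨h, -⟩; exact absurd h (by decide))]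
        split_ifs <;> omega
    · have heff : pvEffColour K x y c = c := by
        unfold pvEffColour
        by_cases h0 : PySem.Int.mod (PySem.Int.floordiv x K + PySem.Int.floordiv y K) 2 ≠ 0
        · rw [if_pos h0, if_neg hW, if_neg hB]
        · rw [if_neg h0]
      rw [if_pos ⟨hW, hB⟩]
      simp only [heff]
      rw [if_neg (fun h => hW h.1), if_neg (fun h => hW h.1), if_neg (fun h => hW h.1),
        if_neg (fun h => hW h.1), if_neg (fun h => hB h.1), if_neg (fun h => hB h.1),
        if_neg (fun h => hB h.1)]
      ring

theorem wbKK (K : Int) (hK : 1 ≤ K) (d : Int × Int × String) :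
    pvWInd K K.toNat K.toNat d + pvBInd K K.toNat K.toNat d = pvMInd d := by
  obtain ⟨x, y, c⟩ := d
  have hr0 : (0:Int) ≤ PySem.Int.mod y K := PySem.Int.mod_nonneg _ (by omega)
  have hq0 : (0:Int) ≤ PySem.Int.mod x K := PySem.Int.mod_nonneg _ (by omega)
  have hrK : PySem.Int.mod y K < K := PySem.Int.mod_lt _ (by omega)
  have hqK : PySem.Int.mod x K < K := PySem.Int.mod_lt _ (by omega)
  have cK : ((K.toNat : Nat) : Int) = K := by omega
  have hc1 : PySem.Int.mod y K < ((K.toNat : Nat) : Int) := by omega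
  have hc2 : PySem.Int.mod x K < ((K.toNat : Nat) : Int) := by omega
  simp only [pvWInd, pvBInd, pvMInd]
  by_cases hW : c = "W"
  · subst hW
    by_cases h0 : PySem.Int.mod (PySem.Int.floordiv x K + PySem.Int.floordiv y K) 2 ≠ 0
    · have heff : pvEffColour K x y "W" = "B" := by
        unfold pvEffColour
        rw [if_pos h0, if_pos rfl]
      rw [heff]
      simp [hc1, hc2] <;> omega
    · have heff : pvEffColour K x y "W" = "W" := by
        unfold pvEffColour
        rw [if_neg h0]
      rw [heff]
      simp [hc1, hc2] <;> omega
  · by_cases hB : c = "B"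
    · subst hB
      by_cases h0 : PySem.Int.mod (PySem.Int.floordiv x K + PySem.Int.floordiv y K) 2 ≠ 0
      · have heff : pvEffColour K x y "B" = "W" := by
          unfold pvEffColour
          rw [if_pos h0, if_neg (by decide), if_pos rfl]
        rw [heff]
        simp [hc1, hc2] <;> omega
      · have heff : pvEffColour K x y "B" = "B" := by
          unfold pvEffColour
          rw [if_neg h0]
        rw [heff]
        simp [hc1, hc2] <;> omega
    · have heff : pvEffColour K x y c = c := by
        unfold pvEffColour
        by_cases h0 : PySem.Int.mod (PySem.Int.floordiv x K + PySem.Int.floordiv y K) 2 ≠ 0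
        · rw [if_pos h0, if_neg hW, if_neg hB]
        · rw [if_neg h0]
      rw [heff]
      simp [hW, hB] <;> omega

-- ---------- B's integration sweep, characterised ----------

-- column prefix sums of the difference array
def pvCS (diff : List (List Int)) (up : Nat) (j : Int) : Int :=
  ∑ p ∈ Finset.range up, pvGet2 diff (p : Int) j

-- the inner loop of B's sweep, as a function of its bound
def pvInner (diff : List (List Int)) (m i : Int) (c : Int) (ca : List Int) (res : Int) :
    List Int × Int × Int :=
  (PySem.List.pyRange 0 c 1).foldl
    (fun st2 j =>
      let ca' := st2.1.set j.toNat (PySem.List.pyGetD st2.1 j 0 + pvGet2 diff i j)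
      let s := st2.2.1 + PySem.List.pyGetD ca' j 0
      (ca', s, max (max st2.2.2 s) (m - s)))
    (ca, 0, res)

-- the outer loop of B's sweep, as a function of its bound
def pvScan (diff : List (List Int)) (m K : Int) (r : Int) : List Int × Int :=
  (PySem.List.pyRange 0 r 1).foldl
    (fun st i =>
      let inner := pvInner diff m i (K + 1) st.1 st.2
      (inner.1, inner.2.2))
    (List.replicate (K + 1).toNat 0, 0)

-- the same maxima computed directly from corner sums
def pvResFold (diff : List (List Int)) (m K : Int) (r : Int) : Int :=
  (PySem.List.pyRange 0 r 1).foldl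
    (fun res i =>
      (PySem.List.pyRange 0 (K + 1) 1).foldl
        (fun res j =>
          max (max res (pvS diff (i + 1).toNat (j + 1).toNat))
            (m - pvS diff (i + 1).toNat (j + 1).toNat)) res)
    0

theorem innerScan (diff : List (List Int)) (m K i : Int) (hi : 0 ≤ i) :
    ∀ (c : Nat), (c : Int) ≤ K + 1 →
    ∀ (ca : List Int) (res : Int),
      ca.length = (K + 1).toNat →
      (∀ jn : Nat, jn < (K + 1).toNat → ca.getD jn 0 = pvCS diff i.toNat jn) →
      (pvInner diff m i (c : Int) ca res).1.length = (K + 1).toNat ∧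
      (∀ jn : Nat, jn < (K + 1).toNat →
        (pvInner diff m i (c : Int) ca res).1.getD jn 0 =
          pvCS diff (if jn < c then i.toNat + 1 else i.toNat) jn) ∧
      (pvInner diff m i (c : Int) ca res).2.1 = pvS diff (i.toNat + 1) c ∧
      (pvInner diff m i (c : Int) ca res).2.2 =
        (PySem.List.pyRange 0 (c : Int) 1).foldl
          (fun r j => max (max r (pvS diff (i + 1).toNat (j + 1).toNat))
            (m - pvS diff (i + 1).toNat (j + 1).toNat)) res := by
  intro c
  induction c with
  | zero =>
    intro _ ca res hlen hread
    unfold pvInner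
    rw [show ((0 : Nat) : Int) = 0 from rfl,
      PySem.List.pyRange_one_eq_nil (show (0:Int) ≤ 0 by omega)]
    simp only [List.foldl_nil]
    refine ⟨hlen, ?_, ?_, ?_⟩
    · intro jn hjn
      rw [if_neg (by omega)]
      exact hread jn hjn
    · show (0 : Int) = pvS diff (i.toNat + 1) 0
      simp [pvS]
    · trivial
  | succ c ih =>
    intro hc ca res hlen hread
    have hc' : (c : Int) ≤ K + 1 := by push_cast at hc ⊢; omega
    have hcK : c < (K + 1).toNat := by push_cast at hc; omega
    obtain ⟨L, R, S, T⟩ := ih hc' ca res hlen hread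
    have hstep : pvInner diff m i ((c + 1 : Nat) : Int) ca res =
        (let st2 := pvInner diff m i (c : Int) ca res
         let ca' := st2.1.set (c : Int).toNat
           (PySem.List.pyGetD st2.1 (c : Int) 0 + pvGet2 diff i (c : Int))
         let s := st2.2.1 + PySem.List.pyGetD ca' (c : Int) 0
         (ca', s, max (max st2.2.2 s) (m - s))) := by
      unfold pvInner
      rw [show ((c + 1 : Nat) : Int) = (c : Int) + 1 by push_cast; ring,
        PySem.List.pyRange_one_succ_right (by positivity), List.foldl_append]
      simp only [List.foldl_cons, List.foldl_nil]
    rw [hstep]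
    simp only [Int.toNat_natCast]
    have e0 : PySem.List.pyGetD (pvInner diff m i (c : Int) ca res).1 (c : Int) 0 =
        pvCS diff i.toNat c := by
      rw [PySem.List.pyGetD_natCast, R c hcK, if_neg (by omega)]
    have hnew : pvCS diff i.toNat c + pvGet2 diff i (c : Int) = pvCS diff (i.toNat + 1) c := by
      unfold pvCS
      rw [Finset.sum_range_succ, Int.toNat_of_nonneg hi]
    have e1 : PySem.List.pyGetD
        ((pvInner diff m i (c : Int) ca res).1.set c
          (PySem.List.pyGetD (pvInner diff m i (c : Int) ca res).1 (c : Int) 0 +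
            pvGet2 diff i (c : Int))) (c : Int) 0 = pvCS diff (i.toNat + 1) c := by
      rw [PySem.List.pyGetD_natCast, getD_set' _ _ _ _,
        if_pos ⟨rfl, by omega⟩, e0, hnew]
    have hSc : pvS diff (i.toNat + 1) c + pvCS diff (i.toNat + 1) (c : Int) =
        pvS diff (i.toNat + 1) (c + 1) := by
      rw [pvS_succ_col]
      rfl
    refine ⟨?_, ?_, ?_, ?_⟩
    · simp only [List.length_set]
      exact L
    · intro jn hjn
      rw [getD_set']
      by_cases hj : c = jn
      · subst hj
        rw [if_pos ⟨rfl, by omega⟩, e0, hnew, if_pos (by omega)]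
      · rw [if_neg (by tauto), R jn hjn]
        by_cases hlt : jn < c
        · rw [if_pos hlt, if_pos (by omega)]
        · rw [if_neg hlt, if_neg (by omega)]
    · show (pvInner diff m i (c : Int) ca res).2.1 + _ = _
      rw [e1, S, hSc]
    · show max (max (pvInner diff m i (c : Int) ca res).2.2 _) _ = _
      rw [e1, S, hSc, T,
        show ((c + 1 : Nat) : Int) = (c : Int) + 1 by push_cast; ring,
        PySem.List.pyRange_one_succ_right (a := 0) (b := (c : Int)) (by positivity),
        List.foldl_append]
      simp only [List.foldl_cons, List.foldl_nil]
      have hcst : pvS diff (i + 1).toNat ((c : Int) + 1).toNat = pvS diff (i.toNat + 1) (c + 1) := by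
        rw [show (i + 1).toNat = i.toNat + 1 by omega, show ((c : Int) + 1).toNat = c + 1 by omega]
      rw [hcst]

theorem outerScan (diff : List (List Int)) (m K : Int) (hK : 0 ≤ K) :
    ∀ r : Nat, (r : Int) ≤ K + 1 →
      (pvScan diff m K (r : Int)).1.length = (K + 1).toNat ∧
      (∀ jn : Nat, jn < (K + 1).toNat →
        (pvScan diff m K (r : Int)).1.getD jn 0 = pvCS diff r jn) ∧
      (pvScan diff m K (r : Int)).2 = pvResFold diff m K (r : Int) := by
  intro r
  induction r with
  | zero =>
    intro _
    unfold pvScan pvResFold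
    rw [show ((0 : Nat) : Int) = 0 from rfl,
      PySem.List.pyRange_one_eq_nil (show (0:Int) ≤ 0 by omega)]
    simp only [List.foldl_nil]
    refine ⟨by simp, ?_, ?_⟩
    · intro jn hjn
      show (List.replicate (K + 1).toNat (0:Int)).getD jn 0 = pvCS diff 0 jn
      rw [List.getD_eq_getElem?_getD, List.getElem?_replicate, if_pos hjn]
      simp [pvCS]
    · trivial
  | succ r ih =>
    intro hr
    have hr' : (r : Int) ≤ K + 1 := by push_cast at hr ⊢; omega
    obtain ⟨L, R, T⟩ := ih hr'
    have hKcast : (((K + 1).toNat : Nat) : Int) = K + 1 := by omega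
    have hstep : pvScan diff m K ((r + 1 : Nat) : Int) =
        (let st := pvScan diff m K (r : Int)
         let inner := pvInner diff m (r : Int) (K + 1) st.1 st.2
         (inner.1, inner.2.2)) := by
      unfold pvScan
      rw [show ((r + 1 : Nat) : Int) = (r : Int) + 1 by push_cast; ring,
        PySem.List.pyRange_one_succ_right (by positivity), List.foldl_append]
      simp only [List.foldl_cons, List.foldl_nil]
    have hin := innerScan diff m K (r : Int) (by positivity) (K + 1).toNat (by omega)
      (pvScan diff m K (r : Int)).1 (pvScan diff m K (r : Int)).2 L
      (by
        intro jn hjn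
        rw [R jn hjn, Int.toNat_natCast])
    rw [hKcast] at hin
    obtain ⟨L', R', _S', T'⟩ := hin
    rw [hstep]
    refine ⟨?_, ?_, ?_⟩
    · show (pvInner diff m (r : Int) (K + 1) (pvScan diff m K (r : Int)).1
        (pvScan diff m K (r : Int)).2).1.length = (K + 1).toNat
      exact L'
    · intro jn hjn
      show (pvInner diff m (r : Int) (K + 1) (pvScan diff m K (r : Int)).1
        (pvScan diff m K (r : Int)).2).1.getD jn 0 = pvCS diff (r + 1) jn
      rw [R' jn hjn, if_pos hjn, Int.toNat_natCast]
    · show (pvInner diff m (r : Int) (K + 1) (pvScan diff m K (r : Int)).1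
        (pvScan diff m K (r : Int)).2).2.2 = pvResFold diff m K ((r + 1 : Nat) : Int)
      rw [T', T]
      unfold pvResFold
      rw [show ((r + 1 : Nat) : Int) = (r : Int) + 1 by push_cast; ring,
        PySem.List.pyRange_one_succ_right (a := 0) (b := (r : Int)) (by positivity),
        List.foldl_append]
      simp only [List.foldl_cons, List.foldl_nil]

-- ---------- the main equivalence ----------

theorem main_eq (N K : Int) (desires : List (Int × Int × String)) (hK : 1 ≤ K) :
    max_satisfied_desires N K desires = max_satisfied_desires_alt N K desires := by
  have hK0 : (0:Int) ≤ K := by omega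
  -- B's first pass, summed
  have hBfold := fun (a b : Nat) => foldB K hK a b desires (pvZeros (K + 2), 0)
    (pvRect_zeros (K + 2))
  have HS : ∀ a b : Nat, pvS (desires.foldl (pvStepB K) (pvZeros (K + 2), 0)).1 a b =
      (desires.map (pvCInd K a b)).sum := by
    intro a b
    have h := (hBfold a b).2.1
    rwa [pvS_zeros, zero_add] at h
  have Hm : (desires.foldl (pvStepB K) (pvZeros (K + 2), 0)).2 = (desires.map pvMInd).sum := by
    have h := (hBfold 0 0).2.2
    simpa using h
  have halt : max_satisfied_desires_alt N K desires =
      (pvScan (desires.foldl (pvStepB K) (pvZeros (K + 2), 0)).1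
        (desires.foldl (pvStepB K) (pvZeros (K + 2), 0)).2 K (K + 1)).2 := rfl
  have hcast1 : (((K + 1).toNat : Nat) : Int) = K + 1 := by omega
  have hout := (outerScan (desires.foldl (pvStepB K) (pvZeros (K + 2), 0)).1
    (desires.foldl (pvStepB K) (pvZeros (K + 2), 0)).2 K hK0 (K + 1).toNat (by omega)).2.2
  rw [hcast1] at hout
  -- A's first pass, summed
  have hAfold := fun (a b : Nat) => foldA K hK a b desires (pvZeros K, pvZeros K)
    (pvRect_zeros K) (pvRect_zeros K)
  have HW : ∀ a b : Nat, pvS (desires.foldl (pvStepA K) (pvZeros K, pvZeros K)).1 a b =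
      (desires.map (pvWInd K a b)).sum := by
    intro a b
    have h := (hAfold a b).2.2.1
    rwa [pvS_zeros, zero_add] at h
  have HB : ∀ a b : Nat, pvS (desires.foldl (pvStepA K) (pvZeros K, pvZeros K)).2 a b =
      (desires.map (pvBInd K a b)).sum := by
    intro a b
    have h := (hAfold a b).2.2.2
    rwa [pvS_zeros, zero_add] at h
  have hprefW := prefix2_closed K (desires.foldl (pvStepA K) (pvZeros K, pvZeros K)).1 hK0
  have hprefB := prefix2_closed K (desires.foldl (pvStepA K) (pvZeros K, pvZeros K)).2 hK0
  have hread : ∀ (t : List (List Int)),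
      (pvRect (pvPrefix2 K t) (K + 1).toNat ∧
        ∀ x y : Int, 0 ≤ x → 0 ≤ y → pvGet2 (pvPrefix2 K t) x y =
          if x ≤ K ∧ y ≤ K then pvS t x.toNat y.toNat else 0) →
      ∀ x y : Int, 0 ≤ x → x ≤ K → 0 ≤ y → y ≤ K →
        pvGet2 (pvPrefix2 K t) x y = pvS t x.toNat y.toNat := by
    intro t h x y hx hx' hy hy'
    rw [h.2 x y hx hy, if_pos ⟨hx', hy'⟩]
  have hneg_l : ∀ (t : List (List Int)),
      pvRect (pvPrefix2 K t) (K + 1).toNat → ∀ b : Int,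
        pvGet2 (pvPrefix2 K t) (-1) b = pvGet2 (pvPrefix2 K t) K b := by
    intro t hR b
    rw [pvGet2_neg_left _ _ hR (by omega), show (((K + 1).toNat : Nat) : Int) - 1 = K by omega]
  have hneg_r : ∀ (t : List (List Int)),
      pvRect (pvPrefix2 K t) (K + 1).toNat → ∀ a : Int, 0 ≤ a → a ≤ K →
        pvGet2 (pvPrefix2 K t) a (-1) = pvGet2 (pvPrefix2 K t) a K := by
    intro t hR a ha ha'
    rw [pvGet2_neg_right _ _ hR (by omega) a ha (by omega),
      show (((K + 1).toNat : Nat) : Int) - 1 = K by omega]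
  rw [halt, hout]
  simp only [max_satisfied_desires, pvPhase1A, prefixA_eq]
  unfold pvResFold
  apply PySem.List.foldl_congr_mem
  intro res i hi
  apply PySem.List.foldl_congr_mem
  intro res' j hj
  rw [PySem.List.mem_pyRange_one] at hi hj
  rw [hneg_l _ hprefW.1 (-1), hneg_l _ hprefW.1 j, hneg_r _ hprefW.1 K hK0 le_rfl,
    hneg_r _ hprefW.1 i (by omega) (by omega),
    hneg_l _ hprefB.1 (-1), hneg_l _ hprefB.1 j, hneg_r _ hprefB.1 K hK0 le_rfl,
    hneg_r _ hprefB.1 i (by omega) (by omega)]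
  rw [hread _ hprefW K K hK0 le_rfl hK0 le_rfl,
    hread _ hprefW i K (by omega) (by omega) hK0 le_rfl,
    hread _ hprefW K j hK0 le_rfl (by omega) (by omega),
    hread _ hprefW i j (by omega) (by omega) (by omega) (by omega),
    hread _ hprefB K K hK0 le_rfl hK0 le_rfl,
    hread _ hprefB i K (by omega) (by omega) hK0 le_rfl,
    hread _ hprefB K j hK0 le_rfl (by omega) (by omega),
    hread _ hprefB i j (by omega) (by omega) (by omega) (by omega)]
  have hs : (desires.map (pvCInd K (i + 1).toNat (j + 1).toNat)).sum =
      (desires.map (pvWInd K K.toNat K.toNat)).sum -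
        (desires.map (pvWInd K i.toNat K.toNat)).sum -
        (desires.map (pvWInd K K.toNat j.toNat)).sum +
        2 * (desires.map (pvWInd K i.toNat j.toNat)).sum +
        (desires.map (pvBInd K i.toNat K.toNat)).sum +
        (desires.map (pvBInd K K.toNat j.toNat)).sum -
        2 * (desires.map (pvBInd K i.toNat j.toNat)).sum := by
    rw [← pv_sum_comb]
    exact congrArg List.sum (List.map_congr_left (fun d _ =>
      cInd_eq K i j hK (by omega) (by omega) (by omega) (by omega) d))
  have hmm : (desires.map pvMInd).sum =
      (desires.map (pvWInd K K.toNat K.toNat)).sum +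
        (desires.map (pvBInd K K.toNat K.toNat)).sum := by
    rw [← pv_sum_add]
    exact congrArg List.sum (List.map_congr_left (fun d _ => (wbKK K hK d).symm))
  simp only [HW, HB, HS, Hm, hs, hmm]
  congr 1
  · congr 1
    ring
  · ring

theorem degenerate_eq (N K : Int) (hK : K ≤ 0) :
    max_satisfied_desires N K [] = max_satisfied_desires_alt N K [] := by
  rcases lt_or_eq_of_le hK with hlt | heq
  · simp only [max_satisfied_desires, max_satisfied_desires_alt]
    rw [PySem.List.pyRange_one_eq_nil (show K + 1 ≤ 0 by omega)]
    rfl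
  · subst heq
    rfl

-- ===== VERDICT (by name: the statement is the Claim_ definition above) =====
theorem max_satisfied_desires_spec : Claim_equal_max_satisfied_desires := by
  intro N K desires _ hpre
  unfold Spec_max_satisfied_desires
  rcases le_or_gt 1 K with hK | hK
  · exact main_eq N K desires hK
  · rcases hpre with h | h
    · omega
    · subst h
      exact degenerate_eq N K (by omega)
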